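-- pv_equiv track=rewrite | github.com/cmsc828p-f17/project1c-predicting-genetic-interactions | data/realData/rf_reg.py | ordering
-- ===== SOURCE A (Python) =====
-- from collections import defaultdict
--
-- def ordering(interactions_matrix,interaction_genes):
--     ordered_interaction_matrix = defaultdict(dict)
--     for gene1 in interaction_genes:
--       for gene2 in interaction_genes:
--         if gene1 in interactions_matrix.keys() and gene2 in interactions_matrix[gene1].keys():
--           ordered_interaction_matrix[gene1][gene2] = interactions_matrix[gene1][gene2]
--         else:
--           ordered_interaction_matrix[gene1][gene2] = 0
--     return ordered_interaction_matrix
-- ===== SOURCE B (Python) =====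
-- from collections import defaultdict
--
-- def ordering(interactions_matrix, interaction_genes):
--     # Stage 1: dense zero matrix; Stage 2: sparse overlay of the real data.
--     ordered_interaction_matrix = defaultdict(dict)
--     zero_row = dict.fromkeys(interaction_genes, 0)
--     for gene1 in interaction_genes:
--         ordered_interaction_matrix[gene1] = dict(zero_row)
--     gene_set = set(interaction_genes)
--     for gene1, row in interactions_matrix.items():
--         if gene1 in gene_set:
--             target = ordered_interaction_matrix[gene1]
--             for gene2, value in row.items():
--                 if gene2 in gene_set:
--                     target[gene2] = value
--     return ordered_interaction_matrix
-- ===== Notes on version B (the rewrite author's own statement) =====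
-- stated objective: alternative
-- what changed: Replaces A's single n*n loop with per-cell dict-membership tests and incremental defaultdict writes by two staged passes: a dense zero-fill copying one precomputed dict.fromkeys row per gene, then a sparse overlay that iterates only over the actual stored interaction data and overwrites existing cells.
import Mathlib
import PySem

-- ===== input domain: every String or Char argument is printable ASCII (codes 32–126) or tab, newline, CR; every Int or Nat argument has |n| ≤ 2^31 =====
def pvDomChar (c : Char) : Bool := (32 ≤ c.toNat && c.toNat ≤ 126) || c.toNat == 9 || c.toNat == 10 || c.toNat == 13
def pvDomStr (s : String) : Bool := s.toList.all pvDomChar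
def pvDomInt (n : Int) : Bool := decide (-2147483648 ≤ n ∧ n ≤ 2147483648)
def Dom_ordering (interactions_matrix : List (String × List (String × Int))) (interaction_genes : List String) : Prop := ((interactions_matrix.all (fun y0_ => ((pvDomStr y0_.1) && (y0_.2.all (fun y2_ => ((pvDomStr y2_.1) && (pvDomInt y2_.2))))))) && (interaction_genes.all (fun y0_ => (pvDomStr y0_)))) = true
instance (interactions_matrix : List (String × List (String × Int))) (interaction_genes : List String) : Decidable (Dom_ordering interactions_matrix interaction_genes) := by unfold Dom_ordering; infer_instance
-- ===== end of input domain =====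

-- B builds the matrix in two staged passes — a dense zero-fill from one precomputed row, then a sparse
-- overlay that iterates only over the stored interaction data — instead of A's single n×n loop with
-- per-cell membership tests (objective: alternative decomposition).

-- ===== PORT A =====
-- 'ordered_interaction_matrix[gene1][gene2] = v' on a defaultdict(dict) is: fetch (or create empty) the
-- row of gene1, set gene2 in it, and write it back at gene1's position (new gene1 keys append) —
-- exactly 'd.insert g1 ((d.getD g1 empty).insert g2 v)'.
def ordering (interactions_matrix : List (String × List (String × Int))) (interaction_genes : List String) : List (String × List (String × Int)) :=
  let res : PySem.Dict String (PySem.Dict String Int) :=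
    interaction_genes.foldl (fun d gene1 =>
      interaction_genes.foldl (fun d gene2 =>
        match (PySem.Dict.mk interactions_matrix).get? gene1 with
        | some row =>
          match (PySem.Dict.mk row).get? gene2 with
          | some x => d.insert gene1 ((d.getD gene1 PySem.Dict.empty).insert gene2 x)
          | none   => d.insert gene1 ((d.getD gene1 PySem.Dict.empty).insert gene2 (0 : Int))
        | none => d.insert gene1 ((d.getD gene1 PySem.Dict.empty).insert gene2 (0 : Int))) d) PySem.Dict.empty
  res.items.map (fun p => (p.1, p.2.items))

-- ===== PORT B =====
-- dict.fromkeys(interaction_genes, 0) keeps first occurrences in order: PySem.List.dedup.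
-- 'target = ordered[gene1]; target[gene2] = value' mutates the row in place and gene1 is already a key
-- (the zero-fill inserted every member of gene_set), so it is 'd.insert gene1 (row-fold on d.getD gene1)'.
def ordering_alt (interactions_matrix : List (String × List (String × Int))) (interaction_genes : List String) : List (String × List (String × Int)) :=
  let zeroRow : PySem.Dict String Int :=
    PySem.Dict.mk ((PySem.List.dedup interaction_genes).map (fun g => (g, (0 : Int))))
  let geneSet : PySem.Set String := PySem.Set.ofList interaction_genes
  let d0 : PySem.Dict String (PySem.Dict String Int) :=
    interaction_genes.foldl (fun d gene1 => d.insert gene1 zeroRow) PySem.Dict.empty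
  let d1 : PySem.Dict String (PySem.Dict String Int) :=
    interactions_matrix.foldl (fun d p =>
      if geneSet.contains p.1 then
        d.insert p.1 (p.2.foldl (fun r q =>
            if geneSet.contains q.1 then r.insert q.1 q.2 else r)
          (d.getD p.1 PySem.Dict.empty))
      else d) d0
  d1.items.map (fun p => (p.1, p.2.items))

-- ===== PRECONDITION & SPEC =====
-- Pre_ excludes only association lists with duplicate dict keys (outer or in a row): they represent no
-- Python dict (a real dict argument always satisfies Pre_), and on them first-match lookup (A's port)
-- and overlay order (B's port) legitimately disagree.
def Pre_ordering (interactions_matrix : List (String × List (String × Int))) (interaction_genes : List String) : Prop :=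
  (interactions_matrix.map Prod.fst).Nodup ∧ ∀ p ∈ interactions_matrix, (p.2.map Prod.fst).Nodup
instance (interactions_matrix : List (String × List (String × Int))) (interaction_genes : List String) : Decidable (Pre_ordering interactions_matrix interaction_genes) := by unfold Pre_ordering; infer_instance
def pvWitness_ordering : (List (String × List (String × Int))) × List String :=
  ([("a", [("b", 1)])], ["a", "b"])
def Spec_ordering (interactions_matrix : List (String × List (String × Int))) (interaction_genes : List String) (out : List (String × List (String × Int))) : Prop := out = ordering_alt interactions_matrix interaction_genes
instance (interactions_matrix : List (String × List (String × Int))) (interaction_genes : List String) (out : List (String × List (String × Int))) : Decidable (Spec_ordering interactions_matrix interaction_genes out) := by unfold Spec_ordering; infer_instance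

-- ===== CLAIM (what is proved, stated in full; the proofs are below) =====
def Claim_equal_ordering : Prop := ∀ (interactions_matrix : List (String × List (String × Int))) (interaction_genes : List String), Dom_ordering interactions_matrix interaction_genes → Pre_ordering interactions_matrix interaction_genes → Spec_ordering interactions_matrix interaction_genes (ordering interactions_matrix interaction_genes)

-- ===== LEMMAS AND PROOFS =====

-- the cell value both programs end up with at (g1, g2)
def pvVal (M : List (String × List (String × Int))) (g1 g2 : String) : Int :=
  match (PySem.Dict.mk M).get? g1 with
  | some row => ((PySem.Dict.mk row).get? g2).getD 0
  | none => 0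

-- the dict whose keys are K, key g mapped to f g
def pvMkBy {ν : Type} (f : String → ν) (K : List String) : PySem.Dict String ν :=
  PySem.Dict.mk (K.map (fun g => (g, f g)))

-- building one row: insert pvVal for each gene in gs
def pvRowF (M : List (String × List (String × Int))) (g1 : String) (r : PySem.Dict String Int) (gs : List String) : PySem.Dict String Int :=
  gs.foldl (fun r g2 => r.insert g2 (pvVal M g1 g2)) r

def pvRow (M : List (String × List (String × Int))) (genes : List String) (g1 : String) : PySem.Dict String Int :=
  pvRowF M g1 PySem.Dict.empty genes

def pvDictOf (M : List (String × List (String × Int))) (genes : List String) (K : List String) : PySem.Dict String (PySem.Dict String Int) :=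
  pvMkBy (pvRow M genes) K

-- inserting the value a key already (first-)maps to, into a nodup-key dict, is a no-op
theorem pv_overwrite_list {ν : Type} (l : List (String × ν)) (k : String) (v : ν)
    (hn : (l.map Prod.fst).Nodup) (h : (PySem.Dict.mk l).get? k = some v) :
    l.map (fun p => if p.1 == k then (k, v) else p) = l := by
  induction l with
  | nil => simp [PySem.Dict.get?] at h
  | cons p t ih =>
    rw [PySem.Dict.get?_mk_cons] at h
    have hn1 : p.1 ∉ t.map Prod.fst := (List.nodup_cons.mp (by simpa using hn)).1
    have hn2 : (t.map Prod.fst).Nodup := (List.nodup_cons.mp (by simpa using hn)).2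
    by_cases hpk : p.1 = k
    · have hv : p.2 = v := by simpa [hpk] using h
      have hmap : t.map (fun q => if q.1 == k then (k, v) else q) = t := by
        apply (List.map_congr_left ?_).trans (List.map_id t)
        intro q hq
        have hqk : q.1 ≠ k := fun hq1 =>
          hn1 (by simpa [hpk, hq1] using List.mem_map_of_mem (f := Prod.fst) hq)
        simp [hqk]
      show (if p.1 == k then (k, v) else p) :: t.map (fun q => if q.1 == k then (k, v) else q) = p :: t
      rw [if_pos (by simp [hpk]), hmap, ← hpk, ← hv]
    · have h' : (PySem.Dict.mk t).get? k = some v := by simpa [hpk] using h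
      show (if p.1 == k then (k, v) else p) :: t.map (fun q => if q.1 == k then (k, v) else q) = p :: t
      rw [if_neg (by simp [hpk]), ih hn2 h']

theorem pv_insert_eq_self {ν : Type} (d : PySem.Dict String ν) (k : String) (v : ν)
    (hn : d.keys.Nodup) (h : d.get? k = some v) : d.insert k v = d := by
  have hc : d.contains k = true := by
    rw [PySem.Dict.contains_eq_isSome_get?, h]; rfl
  apply PySem.Dict.ext
  rw [PySem.Dict.items_insert_of_contains (h := hc)]
  obtain ⟨l⟩ := d
  exact pv_overwrite_list l k v (by simpa [PySem.Dict.keys] using hn) h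

theorem pvMkBy_get? {ν : Type} (f : String → ν) (K : List String) (g : String) :
    (pvMkBy f K).get? g = if g ∈ K then some (f g) else none := by
  induction K with
  | nil => simp [pvMkBy, PySem.Dict.get?]
  | cons k t ih =>
    show (PySem.Dict.mk ((k, f k) :: t.map _)).get? g = _
    rw [PySem.Dict.get?_mk_cons]
    by_cases hk : k = g
    · subst hk; simp
    · simpa [beq_eq_false_iff_ne.mpr hk, Ne.symm hk] using ih

theorem pvMkBy_keys {ν : Type} (f : String → ν) (K : List String) :
    (pvMkBy f K).keys = K := by
  simp [pvMkBy, PySem.Dict.keys, Function.comp_def]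

-- two dicts with the same nodup key list and the same lookups on it are equal
theorem pv_dict_eq_of {ν : Type} (dflt : ν) (d d' : PySem.Dict String ν)
    (h1 : d.keys = d'.keys) (hn : d.keys.Nodup)
    (h : ∀ x ∈ d.keys, d.get? x = d'.get? x) : d = d' := by
  apply PySem.Dict.ext
  rw [PySem.Dict.items_eq_map_keys d hn dflt, PySem.Dict.items_eq_map_keys d' (h1 ▸ hn) dflt, ← h1]
  apply List.map_congr_left
  intro k hk
  rw [PySem.Dict.getD_eq_get?_getD, PySem.Dict.getD_eq_get?_getD, h k hk]

theorem pvRowF_get? (M : List (String × List (String × Int))) (g1 : String) (gs : List String)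
    (r : PySem.Dict String Int) (x : String) :
    (pvRowF M g1 r gs).get? x = if x ∈ gs then some (pvVal M g1 x) else r.get? x := by
  induction gs generalizing r with
  | nil => simp [pvRowF]
  | cons a t ih =>
    show (pvRowF M g1 (r.insert a (pvVal M g1 a)) t).get? x = _
    rw [ih]
    by_cases hx : x ∈ t
    · simp [hx]
    · by_cases hxa : x = a
      · subst hxa; simp [hx]
      · simp [hx, hxa, PySem.Dict.get?_insert]

theorem pvRowF_nodup (M : List (String × List (String × Int))) (g1 : String) (gs : List String)
    (r : PySem.Dict String Int) (hr : r.keys.Nodup) : (pvRowF M g1 r gs).keys.Nodup :=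
  PySem.Dict.nodup_keys_foldl_insert gs (fun _ x => pvVal M g1 x) r hr

theorem pvRowF_idem (M : List (String × List (String × Int))) (g1 : String) (gs : List String)
    (r : PySem.Dict String Int) (hr : r.keys.Nodup)
    (h : ∀ x ∈ gs, r.get? x = some (pvVal M g1 x)) : pvRowF M g1 r gs = r := by
  induction gs with
  | nil => rfl
  | cons a t ih =>
    have hstep : r.insert a (pvVal M g1 a) = r :=
      pv_insert_eq_self r a _ hr (h a (by simp))
    show pvRowF M g1 (r.insert a (pvVal M g1 a)) t = r
    rw [hstep]
    exact ih (fun x hx => h x (by simp [hx]))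

-- the canonical row
theorem pvRow_items (M : List (String × List (String × Int))) (gs : List String) :
    ∀ g1, pvRow M gs g1 = pvMkBy (pvVal M g1) (PySem.Set.ofList gs) := by
  intro g1
  have hkeys : (pvRow M gs g1).keys = PySem.Set.ofList gs := by
    show (gs.foldl (fun r g2 => r.insert g2 (pvVal M g1 g2)) PySem.Dict.empty).keys = _
    rw [PySem.Dict.keys_foldl_insert (f := fun _ x => pvVal M g1 x)]
    simp [PySem.Set.ofList_eq_foldl, PySem.Set.update, PySem.Dict.keys_empty]
  have hnd : (pvRow M gs g1).keys.Nodup :=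
    pvRowF_nodup M g1 gs PySem.Dict.empty (by simp)
  apply PySem.Dict.ext
  show _ = (PySem.Set.ofList gs).map (fun k => (k, pvVal M g1 k))
  rw [PySem.Dict.items_eq_map_keys _ hnd 0, hkeys]
  apply List.map_congr_left
  intro k hk
  have hk' : k ∈ gs := (PySem.Set.mem_ofList _ _).mp hk
  have hget : (pvRow M gs g1).get? k = some (pvVal M g1 k) := by
    show (pvRowF M g1 PySem.Dict.empty gs).get? k = _
    rw [pvRowF_get?]; simp [hk']
  simp [PySem.Dict.getD_eq_get?_getD, hget]

theorem pv_innerA_of_get? (M : List (String × List (String × Int))) (g1 : String)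
    (gs : List String) (d : PySem.Dict String (PySem.Dict String Int))
    (r : PySem.Dict String Int) (hd : d.keys.Nodup) (h : d.get? g1 = some r) :
    gs.foldl (fun d g2 => d.insert g1 ((d.getD g1 PySem.Dict.empty).insert g2 (pvVal M g1 g2))) d
      = d.insert g1 (pvRowF M g1 r gs) := by
  induction gs generalizing d r with
  | nil => exact (pv_insert_eq_self d g1 r hd h).symm
  | cons a t ih =>
    have hgetD : d.getD g1 PySem.Dict.empty = r := by
      rw [PySem.Dict.getD_eq_get?_getD, h]; rfl
    show t.foldl _ (d.insert g1 ((d.getD g1 PySem.Dict.empty).insert a (pvVal M g1 a))) = _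
    rw [hgetD,
      ih (d.insert g1 (r.insert a (pvVal M g1 a))) (r.insert a (pvVal M g1 a))
        (PySem.Dict.nodup_keys_insert _ _ _ hd) (PySem.Dict.get?_insert_self _ _ _),
      PySem.Dict.insert_insert_self]
    rfl

-- A's outer loop invariant
theorem pv_outerA (M : List (String × List (String × Int))) (genes : List String)
    (gs : List String) (hsub : ∀ g ∈ gs, g ∈ genes) (K : List String) (hK : K.Nodup) :
    gs.foldl (fun d g1 =>
        genes.foldl (fun d g2 => d.insert g1 ((d.getD g1 PySem.Dict.empty).insert g2 (pvVal M g1 g2))) d)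
      (pvDictOf M genes K)
      = pvDictOf M genes (PySem.Set.update K gs) := by
  induction gs generalizing K with
  | nil => rfl
  | cons g1 t ih =>
    have hnd : (pvDictOf M genes K).keys.Nodup := by
      rw [pvDictOf, pvMkBy_keys]; exact hK
    have hrow_nd : (pvRow M genes g1).keys.Nodup :=
      pvRowF_nodup M g1 genes PySem.Dict.empty (by simp)
    have hupd : PySem.Set.update K (g1 :: t) = PySem.Set.update (PySem.Set.add K g1) t := rfl
    by_cases hg : g1 ∈ K
    · have hget : (pvDictOf M genes K).get? g1 = some (pvRow M genes g1) := by
        rw [pvDictOf, pvMkBy_get?]; simp [hg]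
      have hinner := pv_innerA_of_get? M g1 genes (pvDictOf M genes K) _ hnd hget
      have hidem : pvRowF M g1 (pvRow M genes g1) genes = pvRow M genes g1 := by
        apply pvRowF_idem _ _ _ _ hrow_nd
        intro x hx
        show (pvRowF M g1 PySem.Dict.empty genes).get? x = _
        rw [pvRowF_get?]; simp [hx]
      have hadd : PySem.Set.add K g1 = K := by
        simp [PySem.Set.add, PySem.Set.contains, hg]
      show t.foldl _ (genes.foldl _ (pvDictOf M genes K)) = _
      rw [hinner, hidem, pv_insert_eq_self _ _ _ hnd hget, hupd, hadd]
      exact ih (fun g hgt => hsub g (by simp [hgt])) K hK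
    · have hget : (pvDictOf M genes K).get? g1 = none := by
        rw [pvDictOf, pvMkBy_get?]; simp [hg]
      have hgenes : g1 ∈ genes := hsub g1 (by simp)
      obtain ⟨a, t', rfl⟩ : ∃ a t', genes = a :: t' := by
        cases genes with
        | nil => cases hgenes
        | cons a t' => exact ⟨a, t', rfl⟩
      have hgetD : (pvDictOf M (a :: t') K).getD g1 PySem.Dict.empty = PySem.Dict.empty := by
        rw [PySem.Dict.getD_eq_get?_getD, hget]; rfl
      have hinner :
          (a :: t').foldl (fun d g2 => d.insert g1 ((d.getD g1 PySem.Dict.empty).insert g2 (pvVal M g1 g2)))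
              (pvDictOf M (a :: t') K)
            = (pvDictOf M (a :: t') K).insert g1 (pvRow M (a :: t') g1) := by
        show (t').foldl _ ((pvDictOf M (a :: t') K).insert g1
            (((pvDictOf M (a :: t') K).getD g1 PySem.Dict.empty).insert a (pvVal M g1 a))) = _
        rw [hgetD,
          pv_innerA_of_get? M g1 t' _ (PySem.Dict.empty.insert a (pvVal M g1 a))
            (PySem.Dict.nodup_keys_insert _ _ _ hnd) (PySem.Dict.get?_insert_self _ _ _),
          PySem.Dict.insert_insert_self]
        rfl
      have hcont : (pvDictOf M (a :: t') K).contains g1 = false := by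
        rw [PySem.Dict.contains_eq_isSome_get?, hget]; rfl
      have hins : (pvDictOf M (a :: t') K).insert g1 (pvRow M (a :: t') g1)
          = pvDictOf M (a :: t') (K ++ [g1]) := by
        apply PySem.Dict.ext
        rw [PySem.Dict.items_insert_of_not_contains (h := hcont)]
        simp [pvDictOf, pvMkBy]
      have hadd : PySem.Set.add K g1 = K ++ [g1] := by
        simp [PySem.Set.add, PySem.Set.contains, hg]
      show t.foldl _ ((a :: t').foldl _ (pvDictOf M (a :: t') K)) = _
      rw [hinner, hins, hupd, hadd]
      exact ih (fun g hgt => hsub g (by simp [hgt])) (K ++ [g1])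
        (by
          simp only [List.nodup_append, List.nodup_cons, List.nodup_nil, and_true]
          refine ⟨hK, by simp, ?_⟩
          intro x hx b hb
          simp only [List.mem_singleton] at hb
          subst hb
          exact fun heq => hg (heq ▸ hx))

-- ===== B-side lemmas =====

-- zero-fill pass: repeated insert of the same constant value over a nodup-key start
theorem pv_fill {ν : Type} (z : ν) (gs : List String) (K : List String) (hK : K.Nodup) :
    gs.foldl (fun d g => d.insert g z) (pvMkBy (fun _ => z) K)
      = pvMkBy (fun _ => z) (PySem.Set.update K gs) := by
  induction gs generalizing K with
  | nil => rfl
  | cons g t ih =>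
    have hnd : (pvMkBy (fun _ => z) K).keys.Nodup := by rw [pvMkBy_keys]; exact hK
    show t.foldl _ ((pvMkBy (fun _ => z) K).insert g z)
      = pvMkBy (fun _ => z) (PySem.Set.update (PySem.Set.add K g) t)
    by_cases hg : g ∈ K
    · have hget : (pvMkBy (fun _ => z) K).get? g = some z := by
        rw [pvMkBy_get?]; simp [hg]
      have hadd : PySem.Set.add K g = K := by
        simp [PySem.Set.add, PySem.Set.contains, hg]
      rw [pv_insert_eq_self _ _ _ hnd hget, hadd]
      exact ih K hK
    · have hget : (pvMkBy (fun _ => z) K).get? g = none := by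
        rw [pvMkBy_get?]; simp [hg]
      have hcont : (pvMkBy (fun _ => z) K).contains g = false := by
        rw [PySem.Dict.contains_eq_isSome_get?, hget]; rfl
      have hins : (pvMkBy (fun _ => z) K).insert g z = pvMkBy (fun _ => z) (K ++ [g]) := by
        apply PySem.Dict.ext
        rw [PySem.Dict.items_insert_of_not_contains (h := hcont)]
        simp [pvMkBy]
      have hadd : PySem.Set.add K g = K ++ [g] := by
        simp [PySem.Set.add, PySem.Set.contains, hg]
      rw [hins, hadd]
      exact ih (K ++ [g])
        (by
          simp only [List.nodup_append, List.nodup_cons, List.nodup_nil, and_true]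
          refine ⟨hK, by simp, ?_⟩
          intro x hx b hb
          simp only [List.mem_singleton] at hb
          subst hb
          exact fun heq => hg (heq ▸ hx))

-- a guarded insert loop whose inserted keys are already present never changes the key list
theorem pv_guard_insert_keys {ν β : Type} (P : β → Bool) (key : β → String)
    (F : PySem.Dict String ν → β → ν) (l : List β) (d : PySem.Dict String ν)
    (h : ∀ q ∈ l, P q = true → key q ∈ d.keys) :
    (l.foldl (fun d q => if P q then d.insert (key q) (F d q) else d) d).keys = d.keys := by
  induction l generalizing d with
  | nil => rfl
  | cons q t ih =>
    show (t.foldl _ (if P q then d.insert (key q) (F d q) else d)).keys = d.keys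
    by_cases hP : P q = true
    · have hcont : d.contains (key q) = true :=
        (PySem.Dict.contains_iff_mem_keys _ _).mpr (h q (by simp) hP)
      have hkeys : (d.insert (key q) (F d q)).keys = d.keys :=
        PySem.Dict.keys_insert_of_contains d (F d q) hcont
      rw [if_pos hP, ih _ (by intro q' hq' hP'; rw [hkeys]; exact h q' (by simp [hq']) hP'), hkeys]
    · rw [if_neg hP]
      exact ih d (fun q' hq' hP' => h q' (by simp [hq']) hP')

-- overlaying one row: lookups after the row overlay
def pvOv (genes : List String) (r : PySem.Dict String Int) (row : List (String × Int)) : PySem.Dict String Int :=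
  row.foldl (fun r q => if (PySem.Set.ofList genes).contains q.1 then r.insert q.1 q.2 else r) r

theorem pvOv_get? (genes : List String) (row : List (String × Int))
    (hnd : (row.map Prod.fst).Nodup) (r : PySem.Dict String Int) (x : String) :
    (pvOv genes r row).get? x =
      match (PySem.Dict.mk row).get? x with
      | some v => if (PySem.Set.ofList genes).contains x then some v else r.get? x
      | none => r.get? x := by
  induction row generalizing r with
  | nil => simp [pvOv, PySem.Dict.get?]
  | cons q t ih =>
    have hq1 : q.1 ∉ t.map Prod.fst := (List.nodup_cons.mp (by simpa using hnd)).1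
    have hnd2 : (t.map Prod.fst).Nodup := (List.nodup_cons.mp (by simpa using hnd)).2
    show (pvOv genes (if (PySem.Set.ofList genes).contains q.1 then r.insert q.1 q.2 else r) t).get? x = _
    rw [ih hnd2, PySem.Dict.get?_mk_cons]
    by_cases hqx : q.1 = x
    · subst hqx
      have ht : (PySem.Dict.mk t).get? q.1 = none := by
        rw [PySem.Dict.get?_eq_none_iff_not_mem_keys]
        simpa using hq1
      rw [ht]
      by_cases hc : (PySem.Set.ofList genes).contains q.1 = true
      · have hm : q.1 ∈ genes := (PySem.Set.mem_ofList _ _).mp ((PySem.Set.contains_iff _ _).mp hc)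
        simp [hm, PySem.Dict.get?_insert_self]
      · have hm : q.1 ∉ genes := fun hm =>
          hc ((PySem.Set.contains_iff _ _).mpr ((PySem.Set.mem_ofList _ _).mpr hm))
        simp [hm]
    · have hstep : (if q.1 ∈ genes then r.insert q.1 q.2 else r).get? x = r.get? x := by
        by_cases hm : q.1 ∈ genes
        · rw [if_pos hm, PySem.Dict.get?_insert_of_ne (hne := fun h => hqx h.symm)]
        · rw [if_neg hm]
      rw [beq_eq_false_iff_ne.mpr hqx]
      cases h : (PySem.Dict.mk t).get? x <;> simp [hstep]

theorem pv_overlay_get? (genes : List String) (M' : List (String × List (String × Int)))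
    (hnd : (M'.map Prod.fst).Nodup) (d : PySem.Dict String (PySem.Dict String Int)) (g : String) :
    (M'.foldl (fun d p =>
        if (PySem.Set.ofList genes).contains p.1 then
          d.insert p.1 (pvOv genes (d.getD p.1 PySem.Dict.empty) p.2)
        else d) d).get? g =
      match (PySem.Dict.mk M').get? g with
      | some row => if (PySem.Set.ofList genes).contains g then
            some (pvOv genes (d.getD g PySem.Dict.empty) row)
          else d.get? g
      | none => d.get? g := by
  induction M' generalizing d with
  | nil => simp [PySem.Dict.get?]
  | cons p t ih =>
    have hq1 : p.1 ∉ t.map Prod.fst := (List.nodup_cons.mp (by simpa using hnd)).1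
    have hnd2 : (t.map Prod.fst).Nodup := (List.nodup_cons.mp (by simpa using hnd)).2
    show (t.foldl _ (if (PySem.Set.ofList genes).contains p.1 then
        d.insert p.1 (pvOv genes (d.getD p.1 PySem.Dict.empty) p.2) else d)).get? g = _
    rw [ih hnd2, PySem.Dict.get?_mk_cons]
    by_cases hpg : p.1 = g
    · subst hpg
      have ht : (PySem.Dict.mk t).get? p.1 = none := by
        rw [PySem.Dict.get?_eq_none_iff_not_mem_keys]
        simpa using hq1
      rw [ht]
      by_cases hc : (PySem.Set.ofList genes).contains p.1 = true
      · have hm : p.1 ∈ genes := (PySem.Set.mem_ofList _ _).mp ((PySem.Set.contains_iff _ _).mp hc)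
        simp [hm, PySem.Dict.get?_insert_self]
      · have hm : p.1 ∉ genes := fun hm =>
          hc ((PySem.Set.contains_iff _ _).mpr ((PySem.Set.mem_ofList _ _).mpr hm))
        simp [hm]
    · have hget : (if p.1 ∈ genes then
          d.insert p.1 (pvOv genes (d.getD p.1 PySem.Dict.empty) p.2) else d).get? g = d.get? g := by
        by_cases hm : p.1 ∈ genes
        · rw [if_pos hm, PySem.Dict.get?_insert_of_ne (hne := fun h => hpg h.symm)]
        · rw [if_neg hm]
      have hgetD : (if p.1 ∈ genes then
          d.insert p.1 (pvOv genes (d.getD p.1 PySem.Dict.empty) p.2) else d).getD g PySem.Dict.empty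
            = d.getD g PySem.Dict.empty := by
        rw [PySem.Dict.getD_eq_get?_getD, hget, ← PySem.Dict.getD_eq_get?_getD]
      rw [beq_eq_false_iff_ne.mpr hpg]
      cases h : (PySem.Dict.mk t).get? g <;> simp [hget, hgetD]

-- the overlaid zero row is the canonical row
theorem pvOv_zero_eq_row (M : List (String × List (String × Int))) (genes : List String)
    (g : String) (row : List (String × Int)) (hM : (PySem.Dict.mk M).get? g = some row)
    (hrow : (row.map Prod.fst).Nodup) :
    pvOv genes (pvMkBy (fun _ => (0 : Int)) (PySem.Set.ofList genes)) row = pvRow M genes g := by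
  have hG : ((pvMkBy (fun _ => (0 : Int)) (PySem.Set.ofList genes)) :
      PySem.Dict String Int).keys = PySem.Set.ofList genes := pvMkBy_keys _ _
  have hkeys : (pvOv genes (pvMkBy (fun _ => (0 : Int)) (PySem.Set.ofList genes)) row).keys
      = PySem.Set.ofList genes := by
    rw [pvOv, pv_guard_insert_keys (P := fun q => (PySem.Set.ofList genes).contains q.1)
      (key := Prod.fst) (F := fun _ q => q.2), hG]
    intro q _ hP
    rw [hG]
    exact (PySem.Set.contains_iff _ _).mp hP
  have hrowk : (pvRow M genes g).keys = PySem.Set.ofList genes := by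
    rw [pvRow_items, pvMkBy_keys]
  apply pv_dict_eq_of (0 : Int)
  · rw [hkeys, hrowk]
  · rw [hkeys]; exact PySem.Set.nodup_ofList _
  · intro x hx
    rw [hkeys] at hx
    have hxg : x ∈ genes := (PySem.Set.mem_ofList _ _).mp hx
    have hcx : (PySem.Set.ofList genes).contains x = true :=
      (PySem.Set.contains_iff _ _).mpr hx
    have hrget : (pvRow M genes g).get? x = some (pvVal M g x) := by
      rw [pvRow_items, pvMkBy_get?]; simp [hx]
    have hzget : ((pvMkBy (fun _ => (0 : Int)) (PySem.Set.ofList genes)) :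
        PySem.Dict String Int).get? x = some 0 := by
      rw [pvMkBy_get?]; simp [hx]
    rw [pvOv_get? genes row hrow, hrget]
    unfold pvVal
    rw [hM]
    cases hr : (PySem.Dict.mk row).get? x
    · simp [hr, hzget]
    · simp [hr, hxg]

-- ===== VERDICT (by name: the statement is the Claim_ definition above) =====
theorem ordering_spec : Claim_equal_ordering := by
  intro M genes _ hPre
  show ordering M genes = ordering_alt M genes
  have hupd0 : PySem.Set.update ([] : List String) genes = PySem.Set.ofList genes := by
    rw [PySem.Set.ofList_eq_foldl]; rfl
  -- A's double loop equals the canonical dict over the deduped genes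
  have hA : genes.foldl (fun d gene1 =>
      genes.foldl (fun d gene2 =>
        match (PySem.Dict.mk M).get? gene1 with
        | some row =>
          match (PySem.Dict.mk row).get? gene2 with
          | some x => d.insert gene1 ((d.getD gene1 PySem.Dict.empty).insert gene2 x)
          | none   => d.insert gene1 ((d.getD gene1 PySem.Dict.empty).insert gene2 (0 : Int))
        | none => d.insert gene1 ((d.getD gene1 PySem.Dict.empty).insert gene2 (0 : Int))) d)
      PySem.Dict.empty = pvDictOf M genes (PySem.Set.ofList genes) := by
    have hcg : ∀ (acc : PySem.Dict String (PySem.Dict String Int)) (g1 : String), g1 ∈ genes →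
        genes.foldl (fun d gene2 =>
          match (PySem.Dict.mk M).get? g1 with
          | some row =>
            match (PySem.Dict.mk row).get? gene2 with
            | some x => d.insert g1 ((d.getD g1 PySem.Dict.empty).insert gene2 x)
            | none   => d.insert g1 ((d.getD g1 PySem.Dict.empty).insert gene2 (0 : Int))
          | none => d.insert g1 ((d.getD g1 PySem.Dict.empty).insert gene2 (0 : Int))) acc
        = genes.foldl (fun d g2 => d.insert g1 ((d.getD g1 PySem.Dict.empty).insert g2 (pvVal M g1 g2))) acc := by
      intro acc g1 _
      apply PySem.List.foldl_congr_mem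
      intro acc2 g2 _
      unfold pvVal
      cases (PySem.Dict.mk M).get? g1 with
      | none => rfl
      | some row =>
        dsimp only
        cases (PySem.Dict.mk row).get? g2 with
        | none => rfl
        | some x => rfl
    refine (PySem.List.foldl_congr_mem (h := hcg) (init := PySem.Dict.empty)).trans ?_
    have := pv_outerA M genes genes (fun _ h => h) [] List.nodup_nil
    rw [hupd0] at this
    exact this
  -- B: the zero-fill pass builds the constant dict over the deduped genes
  have hzero : PySem.Dict.mk ((PySem.List.dedup genes).map (fun g => (g, (0 : Int))))
      = pvMkBy (fun _ => (0 : Int)) (PySem.Set.ofList genes) := by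
    rw [PySem.List.dedup_eq_ofList]; rfl
  have hfill : genes.foldl (fun d g1 =>
      d.insert g1 (pvMkBy (fun _ => (0 : Int)) (PySem.Set.ofList genes))) PySem.Dict.empty
      = pvMkBy (fun _ => pvMkBy (fun _ => (0 : Int)) (PySem.Set.ofList genes)) (PySem.Set.ofList genes) := by
    have := pv_fill (pvMkBy (fun _ => (0 : Int)) (PySem.Set.ofList genes)) genes [] List.nodup_nil
    rw [hupd0] at this
    exact this
  -- B: the overlay pass turns it into the canonical dict
  have hover : M.foldl (fun d p =>
      if (PySem.Set.ofList genes).contains p.1 then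
        d.insert p.1 (p.2.foldl (fun r q =>
            if (PySem.Set.ofList genes).contains q.1 then r.insert q.1 q.2 else r)
          (d.getD p.1 PySem.Dict.empty))
      else d)
      (pvMkBy (fun _ => pvMkBy (fun _ => (0 : Int)) (PySem.Set.ofList genes)) (PySem.Set.ofList genes))
      = pvDictOf M genes (PySem.Set.ofList genes) := by
    show M.foldl (fun (d : PySem.Dict String (PySem.Dict String Int)) p =>
      if (PySem.Set.ofList genes).contains p.1 then
        d.insert p.1 (pvOv genes (d.getD p.1 PySem.Dict.empty) p.2)
      else d) _ = _
    set d0 := pvMkBy (fun _ => pvMkBy (fun _ => (0 : Int)) (PySem.Set.ofList genes)) (PySem.Set.ofList genes) with hd0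
    have hd0keys : d0.keys = PySem.Set.ofList genes := pvMkBy_keys _ _
    have hkeys1 : (M.foldl (fun d p =>
        if (PySem.Set.ofList genes).contains p.1 then
          d.insert p.1 (pvOv genes (d.getD p.1 PySem.Dict.empty) p.2)
        else d) d0).keys = PySem.Set.ofList genes := by
      rw [pv_guard_insert_keys (P := fun p => (PySem.Set.ofList genes).contains p.1)
        (key := Prod.fst) (F := fun d p => pvOv genes (d.getD p.1 PySem.Dict.empty) p.2), hd0keys]
      intro q _ hP
      rw [hd0keys]
      exact (PySem.Set.contains_iff _ _).mp hP
    apply pv_dict_eq_of (PySem.Dict.empty : PySem.Dict String Int)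
    · rw [hkeys1, pvDictOf, pvMkBy_keys]
    · rw [hkeys1]; exact PySem.Set.nodup_ofList _
    · intro x hx
      rw [hkeys1] at hx
      have hxg : x ∈ genes := (PySem.Set.mem_ofList _ _).mp hx
      have hcx : (PySem.Set.ofList genes).contains x = true :=
        (PySem.Set.contains_iff _ _).mpr hx
      have hd0get : d0.get? x = some (pvMkBy (fun _ => (0 : Int)) (PySem.Set.ofList genes)) := by
        rw [hd0, pvMkBy_get?]; simp [hx]
      have hd0getD : d0.getD x PySem.Dict.empty = pvMkBy (fun _ => (0 : Int)) (PySem.Set.ofList genes) := by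
        rw [PySem.Dict.getD_eq_get?_getD, hd0get]; rfl
      rw [pv_overlay_get? genes M hPre.1 d0 x]
      have hrhs : (pvDictOf M genes (PySem.Set.ofList genes)).get? x = some (pvRow M genes x) := by
        rw [pvDictOf, pvMkBy_get?]; simp [hx]
      rw [hrhs]
      cases hM : (PySem.Dict.mk M).get? x with
      | none =>
        show d0.get? x = some (pvRow M genes x)
        rw [hd0get]
        congr 1
        rw [pvRow_items]
        unfold pvMkBy
        congr 1
        apply List.map_congr_left
        intro k _
        unfold pvVal
        rw [hM]
      | some row =>
        have hrownd : (row.map Prod.fst).Nodup := by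
          apply hPre.2 (x, row)
          have := PySem.Dict.mem_items_of_get?_eq_some _ hM
          simpa using this
        show (if (PySem.Set.ofList genes).contains x = true then
            some (pvOv genes (d0.getD x PySem.Dict.empty) row)
          else d0.get? x) = some (pvRow M genes x)
        rw [if_pos hcx, hd0getD, pvOv_zero_eq_row M genes x row hM hrownd]
  -- assemble B
  unfold ordering ordering_alt
  dsimp only
  rw [hA, hzero, hfill, hover]
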